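-- pv_equiv track=rewrite | github.com/venux021/soda | works/zcy2/c9/q21.py | find_descend_fair
-- ===== SOURCE A (Python) =====
-- def find_descend_fair(arr, i):
--     begin = i
--     i += 1
--     height = 1
--     while i < len(arr) and arr[i] <= arr[i-1]:
--         if arr[i] < arr[i-1]:
--             height += 1
--         i += 1
--     return ((i - begin), height)
-- ===== SOURCE B (Python) =====
-- def find_descend_fair(arr, i):
--     # Pass 1: advance j to the end of the non-increasing run (no counting here).
--     j = i + 1
--     while j < len(arr) and arr[j] <= arr[j - 1]:
--         j += 1
--     # Pass 2: count the strict decreases inside the run.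
--     return (j - i, 1 + sum(1 for k in range(i + 1, j) if arr[k] < arr[k - 1]))
-- ===== Notes on version B (the rewrite author's own statement) =====
-- stated objective: simpler
-- what changed: B splits A's single stateful loop into two staged passes: a plain scan that only advances the end index of the non-increasing run, then a separate sum over range(i+1, j) counting the strict decreases, removing the height counter and its inner branch from the loop.
import Mathlib
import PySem

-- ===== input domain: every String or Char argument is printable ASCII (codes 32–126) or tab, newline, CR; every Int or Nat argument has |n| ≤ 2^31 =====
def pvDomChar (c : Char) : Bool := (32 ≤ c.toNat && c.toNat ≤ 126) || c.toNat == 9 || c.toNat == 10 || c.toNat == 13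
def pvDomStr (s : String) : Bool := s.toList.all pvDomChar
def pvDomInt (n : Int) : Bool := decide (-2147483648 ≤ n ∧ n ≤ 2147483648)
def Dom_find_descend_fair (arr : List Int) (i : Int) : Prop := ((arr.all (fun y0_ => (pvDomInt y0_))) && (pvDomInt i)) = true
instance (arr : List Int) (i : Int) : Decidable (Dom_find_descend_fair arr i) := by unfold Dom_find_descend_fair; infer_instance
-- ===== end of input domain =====

-- B replaces A's single stateful loop (index + height counter with an inner branch)
-- by two staged passes: a scan that only finds the run's end, then a separate count
-- of strict decreases over the scanned range; objective: simpler, same cost.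

-- ===== PORT A =====
-- while i < len(arr) and arr[i] <= arr[i-1]: if arr[i] < arr[i-1]: height += 1; i += 1
-- fuel = (len(arr) - i).toNat only bounds the iteration count so the recursion is
-- structural; when fuel is 0 the loop condition i < len(arr) is already false.
-- (pyGet? none = IndexError, excluded by Pre_; the none branch just exits, making the port total)
def fdfA_go (arr : List Int) : Nat → Int → Int → Int × Int
  | 0, i, height => (i, height)
  | fuel + 1, i, height =>
    if i < (arr.length : Int) then
      match PySem.List.pyGet? arr i, PySem.List.pyGet? arr (i - 1) with
      | some a, some b =>
        if a ≤ b then fdfA_go arr fuel (i + 1) (if a < b then height + 1 else height)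
        else (i, height)
      | _, _ => (i, height)
    else (i, height)

def find_descend_fair (arr : List Int) (i : Int) : Int × Int :=
  let r := fdfA_go arr ((arr.length : Int) - (i + 1)).toNat (i + 1) 1
  (r.1 - i, r.2)

-- ===== PORT B =====
-- pass 1: 'while j < len(arr) and arr[j] <= arr[j-1]: j += 1' — no counter, only the index
def fdfB_scan (arr : List Int) : Nat → Int → Int
  | 0, j => j
  | fuel + 1, j =>
    if j < (arr.length : Int) then
      match PySem.List.pyGet? arr j, PySem.List.pyGet? arr (j - 1) with
      | some a, some b => if a ≤ b then fdfB_scan arr fuel (j + 1) else j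
      | _, _ => j
    else j

-- pass 2: 'sum(1 for k in range(l, r) if arr[k] < arr[k-1])' (the none branch is
-- unreachable on the admitted inputs: every k in the range passed pass 1's lookups)
def fdfB_count (arr : List Int) (l r : Int) : Int :=
  ((PySem.List.pyRange l r 1).filter (fun k =>
    match PySem.List.pyGet? arr k, PySem.List.pyGet? arr (k - 1) with
    | some a, some b => decide (a < b)
    | _, _ => false)).length

def find_descend_fair_alt (arr : List Int) (i : Int) : Int × Int :=
  let j := fdfB_scan arr ((arr.length : Int) - (i + 1)).toNat (i + 1)
  (j - i, 1 + fdfB_count arr (i + 1) j)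

-- ===== PRECONDITION & SPEC =====
-- Pre_ excludes exactly the inputs where A raises IndexError: the loop is entered
-- (i + 1 < len(arr)) with a start index below -len(arr), so arr[i] / arr[i-1] is out of range.
def Pre_find_descend_fair (arr : List Int) (i : Int) : Prop :=
  ¬ (i + 1 < (arr.length : Int) ∧ i < -(arr.length : Int))
instance (arr : List Int) (i : Int) : Decidable (Pre_find_descend_fair arr i) := by
  unfold Pre_find_descend_fair; infer_instance

def pvWitness_find_descend_fair : List Int × Int := ([3, 2, 2, 1], 0)

def Spec_find_descend_fair (arr : List Int) (i : Int) (out : Int × Int) : Prop := out = find_descend_fair_alt arr i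
instance (arr : List Int) (i : Int) (out : Int × Int) : Decidable (Spec_find_descend_fair arr i out) := by unfold Spec_find_descend_fair; infer_instance

-- ===== CLAIM (what is proved, stated in full; the proofs are below) =====
def Claim_equal_find_descend_fair : Prop := ∀ (arr : List Int) (i : Int), Dom_find_descend_fair arr i → Pre_find_descend_fair arr i → Spec_find_descend_fair arr i (find_descend_fair arr i)

-- ===== LEMMAS AND PROOFS =====

lemma fdfB_count_self (arr : List Int) (j : Int) : fdfB_count arr j j = 0 := by
  simp [fdfB_count]

lemma fdfB_scan_le (arr : List Int) (fuel : Nat) :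
    ∀ j : Int, j ≤ fdfB_scan arr fuel j := by
  induction fuel with
  | zero => intro j; simp [fdfB_scan]
  | succ fuel ih =>
    intro j
    simp only [fdfB_scan]
    split_ifs with hj
    · cases hga : PySem.List.pyGet? arr j with
      | none => simp
      | some a =>
        cases hgb : PySem.List.pyGet? arr (j - 1) with
        | none => simp
        | some b =>
          by_cases hab : a ≤ b
          · simp only [hab, if_true]
            have := ih (j + 1); omega
          · simp [hab]
    · omega

-- one loop step of A's counter = one element of B's filtered range
lemma fdf_go_eq (arr : List Int) (fuel : Nat) :
    ∀ (j height : Int),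
      fdfA_go arr fuel j height =
        (fdfB_scan arr fuel j, height + fdfB_count arr j (fdfB_scan arr fuel j)) := by
  induction fuel with
  | zero =>
    intro j height
    simp [fdfA_go, fdfB_scan, fdfB_count_self]
  | succ fuel ih =>
    intro j height
    simp only [fdfA_go, fdfB_scan]
    split_ifs with hj
    · cases hga : PySem.List.pyGet? arr j with
      | none => simp [fdfB_count_self]
      | some a =>
        cases hgb : PySem.List.pyGet? arr (j - 1) with
        | none => simp [fdfB_count_self]
        | some b =>
          by_cases hab : a ≤ b
          · simp only [hab, if_true]
            rw [ih (j + 1)]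
            have hlt : j < fdfB_scan arr fuel (j + 1) := by
              have := fdfB_scan_le arr fuel (j + 1); omega
            have hcount : fdfB_count arr j (fdfB_scan arr fuel (j + 1)) =
                (if a < b then 1 else 0) + fdfB_count arr (j + 1) (fdfB_scan arr fuel (j + 1)) := by
              unfold fdfB_count
              rw [PySem.List.pyRange_one_cons hlt, List.filter_cons]
              simp only [hga, hgb]
              by_cases hlt2 : a < b
              · simp [hlt2]; omega
              · simp [hlt2]
            rw [hcount]
            by_cases hlt2 : a < b
            · simp [hlt2]; ring
            · simp [hlt2]
          · simp [hab, fdfB_count_self]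
    · simp [fdfB_count_self]

-- ===== VERDICT (by name: the statement is the Claim_ definition above) =====
theorem find_descend_fair_spec : Claim_equal_find_descend_fair := by
  intro arr i _ _
  unfold Spec_find_descend_fair find_descend_fair find_descend_fair_alt
  rw [fdf_go_eq]
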